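-- pv_equiv track=rewrite | github.com/ochavarria/Proyectos-TEC | Progras/Python/Introduccion/Calendario.py | buscando_AyT2
-- ===== SOURCE A (Python) =====
-- def pertenece(lista,inp):
--     if(lista==[]):
--         return False
--     else:
--         if(lista[0]==inp):
--             return True
--         else:
--             return pertenece(lista[1:],inp)
--
-- def buscando_AyT2(lista,titulo,Apellido):
--     if(lista==[]):
--         return []
--     else:
--         if(pertenece(lista[0],titulo)and(pertenece(lista[0],Apellido))):
--             return lista[0] +list('   ')+ buscando_AyT2(lista[1:],titulo,Apellido)
--
--         else:
--             return buscando_AyT2(lista[1:],titulo,Apellido)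
-- ===== SOURCE B (Python) =====
-- def buscando_AyT2(lista, titulo, Apellido):
--     result = []
--     for sub in lista:
--         if titulo in sub and Apellido in sub:
--             result += sub + [' ', ' ', ' ']
--     return result
-- ===== Notes on version B (the rewrite author's own statement) =====
-- stated objective: simpler
-- what changed: Replaced the two nested recursions (a hand-written recursive 'pertenece' membership helper inside a recursive filter-and-concat that copies the list with lista[1:] at every step) by one flat iterative loop using the built-in 'in' membership test and an accumulator.
import Mathlib
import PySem

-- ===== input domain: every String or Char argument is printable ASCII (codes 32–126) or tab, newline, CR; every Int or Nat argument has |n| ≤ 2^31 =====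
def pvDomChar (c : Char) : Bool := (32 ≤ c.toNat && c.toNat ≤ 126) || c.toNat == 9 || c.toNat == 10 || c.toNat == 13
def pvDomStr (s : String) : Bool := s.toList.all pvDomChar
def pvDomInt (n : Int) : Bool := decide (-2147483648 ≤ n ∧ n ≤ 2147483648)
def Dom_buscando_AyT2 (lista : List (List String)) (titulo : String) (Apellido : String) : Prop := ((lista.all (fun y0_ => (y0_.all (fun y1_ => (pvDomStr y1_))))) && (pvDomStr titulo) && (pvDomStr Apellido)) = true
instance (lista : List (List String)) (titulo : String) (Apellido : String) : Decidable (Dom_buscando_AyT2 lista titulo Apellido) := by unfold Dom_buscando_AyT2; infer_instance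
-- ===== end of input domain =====

-- B replaces A's two nested recursions (recursive membership helper inside a recursive
-- filter-and-concat) by one flat loop using built-in membership; objective: simpler.

-- ===== PORT A =====
-- literal port of A's recursive 'pertenece'
def pertenece (lista : List String) (inp : String) : Bool :=
  match lista with
  | [] => false
  | x :: rest => if x == inp then true else pertenece rest inp

def buscando_AyT2 (lista : List (List String)) (titulo : String) (Apellido : String) : List String :=
  match lista with
  | [] => []
  | sub :: rest =>
      if pertenece sub titulo && pertenece sub Apellido then
        sub ++ [" ", " ", " "] ++ buscando_AyT2 rest titulo Apellido
      else
        buscando_AyT2 rest titulo Apellido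

-- ===== PORT B =====
def buscando_AyT2_alt (lista : List (List String)) (titulo : String) (Apellido : String) : List String :=
  lista.foldl (fun result sub =>
    if sub.contains titulo && sub.contains Apellido then
      result ++ (sub ++ [" ", " ", " "])
    else result) []

-- ===== PRECONDITION & SPEC =====
def Spec_buscando_AyT2 (lista : List (List String)) (titulo : String) (Apellido : String) (out : List String) : Prop := out = buscando_AyT2_alt lista titulo Apellido
instance (lista : List (List String)) (titulo : String) (Apellido : String) (out : List String) : Decidable (Spec_buscando_AyT2 lista titulo Apellido out) := by unfold Spec_buscando_AyT2; infer_instance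

-- ===== CLAIM (what is proved, stated in full; the proofs are below) =====
def Claim_equal_buscando_AyT2 : Prop := ∀ (lista : List (List String)) (titulo : String) (Apellido : String), Dom_buscando_AyT2 lista titulo Apellido → Spec_buscando_AyT2 lista titulo Apellido (buscando_AyT2 lista titulo Apellido)

-- ===== LEMMAS AND PROOFS =====

theorem pertenece_eq_contains (lista : List String) (inp : String) :
    pertenece lista inp = lista.contains inp := by
  induction lista with
  | nil => rfl
  | cons x rest ih =>
      simp only [pertenece, List.contains_cons, ih]
      by_cases h : x = inp
      · simp [h]
      · simp [h, Ne.symm h]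

theorem alt_foldl_acc (lista : List (List String)) (titulo Apellido : String)
    (acc : List String) :
    lista.foldl (fun result sub =>
      if sub.contains titulo && sub.contains Apellido then
        result ++ (sub ++ [" ", " ", " "])
      else result) acc
    = acc ++ buscando_AyT2 lista titulo Apellido := by
  induction lista generalizing acc with
  | nil => simp [buscando_AyT2]
  | cons sub rest ih =>
      simp only [List.foldl_cons, buscando_AyT2, pertenece_eq_contains]
      by_cases h : (sub.contains titulo && sub.contains Apellido) = true
      · rw [if_pos h, if_pos h, ih, List.append_assoc]
      · rw [if_neg h, if_neg h, ih]

-- ===== VERDICT (by name: the statement is the Claim_ definition above) =====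
theorem buscando_AyT2_spec : Claim_equal_buscando_AyT2 := by
  intro lista titulo Apellido _
  unfold Spec_buscando_AyT2 buscando_AyT2_alt
  rw [alt_foldl_acc, List.nil_append]
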